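-- pv_equiv track=rewrite | github.com/lcirvine/advent_of_code | 2021/day17.py | step_y
-- ===== SOURCE A (Python) =====
-- def step_y(v_y, y=0, y_min=-72, y_max=-132, height=0):
--     # y position increases by y velocity
--     y += v_y
--     # gravity - y velocity decreases by 1
--     v_y -= 1
--     if v_y == 0:
--         height = y
--     if y in range(y_min, y_max - 1, -1):
--         return height
--     elif y < y_max:
--         return 0
--     else:
--         return step_y(v_y=v_y, y=y, height=height)
-- ===== SOURCE B (Python) =====
-- # Closed-form re-implementation (no step-by-step recursion): apex by the triangular-number
-- # formula, landing step found by binary search.  NOTE: A's recursive call drops y_min/y_max,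
-- # so after the first step the target band is always the default y_min=-72, y_max=-132; B reproduces that.
--
-- def _least(c, t):
--     # least k in [1, t] with k*(k+c) >= t   (requires t >= 2, c >= -1)
--     lo, hi = 1, t
--     while lo < hi:
--         mid = (lo + hi) // 2
--         if mid * (mid + c) >= t:
--             hi = mid
--         else:
--             lo = mid + 1
--     return lo
--
--
-- def _rest(v, y, h):
--     # value of the process from state (v, y, h) with the default band y_min=-72, y_max=-132:
--     # positions y + k*v - k*(k-1)//2, stop at the first k >= 1 at or below -72
--     y1 = y + v
--     if y1 <= -72:
--         hh = y1 if v == 1 else h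
--         return hh if y1 >= -132 else 0
--     if v >= 1:
--         peak = y + v * (v + 1) // 2   # apex, reached with velocity 0
--         hh = peak                      # the height A records at the apex
--         u = 0
--     else:
--         peak = y                       # already falling: "apex" is the start
--         hh = h
--         u = -v
--     # positions from the apex on: peak - k*u - k*(k-1)//2 for k = 1, 2, ...
--     k = _least(2 * u - 1, 2 * (peak + 72))
--     land = peak - k * u - k * (k - 1) // 2
--     return hh if land >= -132 else 0
--
--
-- def step_y(v_y, y=0, y_min=-72, y_max=-132, height=0):
--     # first step: the only one that sees the caller's y_min/y_max
--     y1 = y + v_y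
--     h1 = y1 if v_y == 1 else height
--     if y_max <= y1 <= y_min:
--         return h1
--     if y1 < y_max:
--         return 0
--     return _rest(v_y - 1, y1, h1)
-- ===== Notes on version B (the rewrite author's own statement) =====
-- stated objective: faster
-- what changed: B replaces A's one-step-at-a-time recursive simulation by a closed form: the apex via the triangular-number formula and the landing step via a binary search over the eventually monotone trajectory, reproducing exactly A's behaviour that the recursive call drops y_min/y_max so all steps after the first use the default band y_min=-72/y_max=-132.
-- outside the precondition, e.g. on step_y(0, 451643, -72, -132, 0): A returns 0, B returns 0
import Mathlib
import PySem

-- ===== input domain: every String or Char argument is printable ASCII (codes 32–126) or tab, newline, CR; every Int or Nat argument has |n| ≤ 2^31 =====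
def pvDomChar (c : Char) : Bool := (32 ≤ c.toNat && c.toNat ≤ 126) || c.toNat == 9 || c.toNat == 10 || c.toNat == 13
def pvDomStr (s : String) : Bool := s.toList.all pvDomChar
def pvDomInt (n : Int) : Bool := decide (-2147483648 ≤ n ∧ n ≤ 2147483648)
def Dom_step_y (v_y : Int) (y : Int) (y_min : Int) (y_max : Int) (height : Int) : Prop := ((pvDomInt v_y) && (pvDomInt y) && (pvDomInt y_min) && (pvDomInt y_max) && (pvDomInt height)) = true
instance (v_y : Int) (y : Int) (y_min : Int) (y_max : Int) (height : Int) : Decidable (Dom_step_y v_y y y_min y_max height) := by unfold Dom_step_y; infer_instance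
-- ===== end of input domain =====

-- B computes the same value by the closed-form apex plus a binary search for the landing
-- step instead of simulating step by step (objective: faster).  Note A's recursive call
-- drops y_min/y_max, so from the second step on the band is always the Python default
-- y_min=-72, y_max=-132; both ports keep that.

-- ===== PORT A =====
-- literal transliteration of A, made total by a fuel counter that strictly exceeds the
-- number of simulated steps (proved in go_eq_rest/step_eq below); 'y in range(y_min, y_max - 1, -1)'
-- ⇔ y_max - 1 < y ∧ y ≤ y_min; the recursive call passes only v_y, y, height, so
-- y_min/y_max revert to the Python defaults -72/-132
def step_y_go : Nat → Int → Int → Int → Int → Int → Int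
  | 0, _, _, _, _, _ => 0
  | Nat.succ n, v_y, y, y_min, y_max, height =>
    let y' := y + v_y
    let v' := v_y - 1
    let h := if v' = 0 then y' else height
    if y_max - 1 < y' ∧ y' ≤ y_min then h
    else if y' < y_max then 0
    else step_y_go n v' y' (-72) (-132) h

def step_y (v_y : Int) (y : Int) (y_min : Int) (y_max : Int) (height : Int) : Int :=
  step_y_go ((v_y + 1).toNat * ((v_y + 1).toNat + 1) + 2 * (y + 133).toNat + 2) v_y y y_min y_max height

-- ===== PORT B =====
-- B-side helper: least k in [1, t] with k*(k+c) ≥ t, by binary search (Source B's _least)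
def bLeastAux : Nat → Int → Int → Int → Int → Int
  | 0, _, _, lo, _ => lo
  | Nat.succ n, c, t, lo, hi =>
    if lo < hi then
      let mid := PySem.Int.floordiv (lo + hi) 2
      if t ≤ mid * (mid + c) then bLeastAux n c t lo mid
      else bLeastAux n c t (mid + 1) hi
    else lo

def bLeast (c : Int) (t : Int) : Int := bLeastAux (t - 1).toNat c t 1 t

-- Source B's _rest: value of the process from state (v, y, h) with the default band y_min=-72, y_max=-132
def rest_alt (v : Int) (y : Int) (h : Int) : Int :=
  let y1 := y + v
  if y1 ≤ -72 then
    let hh := if v = 1 then y1 else h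
    if -132 ≤ y1 then hh else 0
  else
    let p : Int × Int × Int :=
      if 1 ≤ v then (y + PySem.Int.floordiv (v * (v + 1)) 2, y + PySem.Int.floordiv (v * (v + 1)) 2, 0)
      else (y, h, -v)
    let k := bLeast (2 * p.2.2 - 1) (2 * (p.1 + 72))
    let land := p.1 - k * p.2.2 - PySem.Int.floordiv (k * (k - 1)) 2
    if -132 ≤ land then p.2.1 else 0

def step_y_alt (v_y : Int) (y : Int) (y_min : Int) (y_max : Int) (height : Int) : Int :=
  let y1 := y + v_y
  let h1 := if v_y = 1 then y1 else height
  if y_max ≤ y1 ∧ y1 ≤ y_min then h1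
  else if y1 < y_max then 0
  else rest_alt (v_y - 1) y1 h1

-- ===== PRECONDITION & SPEC =====
-- Pre_ excludes inputs whose trajectory takes more than 900 steps to come back down to the
-- band level: there A's recursion exceeds CPython's default recursion limit and raises
-- RecursionError (900 is a safe under-approximation of the limit of ~1000, so a thin band of
-- deep-but-still-returning inputs is excluded as well).
def Pre_step_y (v_y : Int) (y : Int) (y_min : Int) (y_max : Int) (height : Int) : Prop :=
  (y_max ≤ y + v_y ∧ y + v_y ≤ y_min) ∨ y + v_y < y_max ∨
  y + 2 * v_y - 1 ≤ -72 ∨ y + 901 * v_y - 405450 ≤ -72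
instance (v_y : Int) (y : Int) (y_min : Int) (y_max : Int) (height : Int) : Decidable (Pre_step_y v_y y y_min y_max height) := by unfold Pre_step_y; infer_instance

def pvWitness_step_y : Int × Int × Int × Int × Int := (6, 0, -72, -132, 0)

def Spec_step_y (v_y : Int) (y : Int) (y_min : Int) (y_max : Int) (height : Int) (out : Int) : Prop := out = step_y_alt v_y y y_min y_max height
instance (v_y : Int) (y : Int) (y_min : Int) (y_max : Int) (height : Int) (out : Int) : Decidable (Spec_step_y v_y y y_min y_max height out) := by unfold Spec_step_y; infer_instance

-- ===== CLAIM (what is proved, stated in full; the proofs are below) =====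
def Claim_equal_step_y : Prop := ∀ (v_y : Int) (y : Int) (y_min : Int) (y_max : Int) (height : Int), Dom_step_y v_y y y_min y_max height → Pre_step_y v_y y y_min y_max height → Spec_step_y v_y y y_min y_max height (step_y v_y y y_min y_max height)
-- ===== LEMMAS AND PROOFS =====

theorem bLeastAux_least (c t : Int) (hc : -1 ≤ c) :
    ∀ (n : Nat) (lo hi : Int), (hi - lo).toNat ≤ n → 1 ≤ lo → lo ≤ hi → t ≤ hi * (hi + c) →
      (∀ j, 1 ≤ j → j < lo → j * (j + c) < t) →
      1 ≤ bLeastAux n c t lo hi ∧ bLeastAux n c t lo hi ≤ hi ∧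
        t ≤ bLeastAux n c t lo hi * (bLeastAux n c t lo hi + c) ∧
        ∀ j, 1 ≤ j → j < bLeastAux n c t lo hi → j * (j + c) < t := by
  intro n
  induction n with
  | zero =>
    intro lo hi hn h1 h2 h3 h4
    have : lo = hi := by omega
    subst this
    exact ⟨h1, le_refl _, h3, h4⟩
  | succ n ih =>
    intro lo hi hn h1 h2 h3 h4
    rw [bLeastAux]
    by_cases hlh : lo < hi
    · rw [if_pos hlh]
      have hb := PySem.Int.floordiv_eq_ediv_of_pos (a := lo + hi) (b := 2) (by norm_num)
      set mid := PySem.Int.floordiv (lo + hi) 2 with hmid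
      have hm1 : lo ≤ mid := by omega
      have hm2 : mid < hi := by omega
      by_cases hp : t ≤ mid * (mid + c)
      · rw [if_pos hp]
        obtain ⟨a1, a2, a3, a4⟩ := ih lo mid (by omega) h1 hm1 hp h4
        exact ⟨a1, by omega, a3, a4⟩
      · rw [if_neg hp]
        refine ih (mid + 1) hi (by omega) (by omega) (by omega) h3 ?_
        intro j hj1 hj2
        by_cases hjl : j < lo
        · exact h4 j hj1 hjl
        · have hjm : j ≤ mid := by omega
          have hmj : (0:Int) ≤ (mid - j) * (mid + j + c) :=
            mul_nonneg (by omega) (by omega)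
          nlinarith [not_le.mp hp]
    · rw [if_neg hlh]
      have h5 : lo = hi := by omega
      subst h5
      exact ⟨h1, le_refl _, h3, h4⟩

theorem least_unique (c t a b : Int)
    (ha1 : 1 ≤ a) (ha2 : t ≤ a * (a + c)) (ha3 : ∀ j, 1 ≤ j → j < a → j * (j + c) < t)
    (hb1 : 1 ≤ b) (hb2 : t ≤ b * (b + c)) (hb3 : ∀ j, 1 ≤ j → j < b → j * (j + c) < t) :
    a = b := by
  rcases lt_trichotomy a b with h | h | h
  · exact absurd ha2 (not_le.mpr (hb3 a ha1 h))
  · exact h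
  · exact absurd hb2 (not_le.mpr (ha3 b hb1 h))

theorem bLeast_least (c t : Int) (hc : -1 ≤ c) (ht : 2 ≤ t) (htc : 1 ≤ t + c) :
    1 ≤ bLeast c t ∧ t ≤ bLeast c t * (bLeast c t + c) ∧
      ∀ j, 1 ≤ j → j < bLeast c t → j * (j + c) < t := by
  have h := bLeastAux_least c t hc (t - 1).toNat 1 t (by omega) (by omega) (by omega)
    (by nlinarith) (by intro j h1 h2; omega)
  exact ⟨h.1, h.2.2.1, h.2.2.2⟩

theorem fd_two_mul (m : Int) : PySem.Int.floordiv (2 * m) 2 = m := by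
  rw [PySem.Int.floordiv_eq_ediv_of_pos (by norm_num)]; omega

theorem rest_alt_low (v y h : Int) (h1 : y + v ≤ -72) :
    rest_alt v y h = if -132 ≤ y + v then (if v = 1 then y + v else h) else 0 := by
  simp only [rest_alt]
  rw [if_pos h1]

theorem rest_alt_pos (v y h : Int) (h1 : ¬ y + v ≤ -72) (h2 : 1 ≤ v) :
    rest_alt v y h =
      (if -132 ≤ y + PySem.Int.floordiv (v * (v + 1)) 2 -
          PySem.Int.floordiv (bLeast (-1) (2 * (y + PySem.Int.floordiv (v * (v + 1)) 2 + 72)) *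
            (bLeast (-1) (2 * (y + PySem.Int.floordiv (v * (v + 1)) 2 + 72)) - 1)) 2
        then y + PySem.Int.floordiv (v * (v + 1)) 2 else 0) := by
  simp only [rest_alt]
  rw [if_neg h1, if_pos h2]
  norm_num

theorem rest_alt_neg (v y h : Int) (h1 : ¬ y + v ≤ -72) (h2 : ¬ 1 ≤ v) :
    rest_alt v y h =
      (if -132 ≤ y - bLeast (2 * -v - 1) (2 * (y + 72)) * -v -
          PySem.Int.floordiv (bLeast (2 * -v - 1) (2 * (y + 72)) *
            (bLeast (2 * -v - 1) (2 * (y + 72)) - 1)) 2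
        then h else 0) := by
  simp only [rest_alt]
  rw [if_neg h1, if_neg h2]

-- the heart: one simulated step leaves the closed-form value unchanged
theorem rest_inv (v y h : Int) (hy : -72 < y + v) :
    rest_alt v y h = rest_alt (v - 1) (y + v) (if v = 1 then y + v else h) := by
  by_cases hv2 : 2 ≤ v
  · -- ascending: same apex, same search
    rw [rest_alt_pos v y h (by omega) (by omega),
        rest_alt_pos (v - 1) (y + v) _ (by omega) (by omega)]
    obtain ⟨m, hm⟩ := Int.even_mul_succ_self (v - 1)
    have e1 : PySem.Int.floordiv ((v - 1) * (v - 1 + 1)) 2 = m := by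
      rw [show (v - 1) * (v - 1 + 1) = 2 * m from by linear_combination hm, fd_two_mul]
    have e2 : PySem.Int.floordiv (v * (v + 1)) 2 = m + v := by
      rw [show v * (v + 1) = 2 * (m + v) from by linear_combination hm, fd_two_mul]
    rw [e1, e2, show y + (m + v) = y + v + m from by ring]
  · by_cases hv1 : v = 1
    · -- apex reached in this very step
      subst hv1
      have e : PySem.Int.floordiv ((1:Int) * (1 + 1)) 2 = 1 := by
        rw [show ((1:Int) * (1 + 1)) = 2 * 1 from by norm_num, fd_two_mul]
      rw [rest_alt_pos 1 y h (by omega) (by omega), if_pos rfl, e]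
      norm_num
      rw [rest_alt_neg 0 (y + 1) (y + 1) (by omega) (by omega)]
      norm_num
    · -- descending: the search index shifts by exactly one
      have hv0 : v ≤ 0 := by omega
      rw [if_neg hv1]
      rw [rest_alt_neg v y h (by omega) (by omega)]
      have hyb : 1 - v ≤ y + 72 := by omega
      obtain ⟨hk1, hk2, hk3⟩ := bLeast_least (2 * -v - 1) (2 * (y + 72))
        (by omega) (by omega) (by omega)
      set k := bLeast (2 * -v - 1) (2 * (y + 72)) with hkdef
      by_cases hC : y + 2 * v - 1 ≤ -72
      · -- the next step already lands at or below -72: k = 2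
        rw [rest_alt_low (v - 1) (y + v) h (by omega)]
        have hk : k = 2 := by
          refine least_unique _ _ _ _ hk1 hk2 hk3 (by omega) (by nlinarith) ?_
          intro j hj1 hj2
          have : j = 1 := by omega
          subst this
          nlinarith
        rw [hk]
        have e : PySem.Int.floordiv ((2:Int) * (2 - 1)) 2 = 1 := by
          rw [show ((2:Int) * (2 - 1)) = 2 * 1 from by norm_num, fd_two_mul]
        rw [e, show y - 2 * -v - 1 = y + v + (v - 1) from by ring,
            if_neg (show ¬ (v - 1 = 1) from by omega)]
      · -- still above -72 after the next step: k = k' + 1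
        rw [rest_alt_neg (v - 1) (y + v) h (by omega) (by omega)]
        obtain ⟨hq1, hq2, hq3⟩ := bLeast_least (2 * -(v - 1) - 1) (2 * (y + v + 72))
          (by omega) (by omega) (by omega)
        set q := bLeast (2 * -(v - 1) - 1) (2 * (y + v + 72)) with hqdef
        have hk : k = q + 1 := by
          refine least_unique _ _ _ _ hk1 hk2 hk3 (by omega) (by nlinarith) ?_
          intro j hj1 hj2
          by_cases hj : j = 1
          · subst hj; nlinarith
          · have := hq3 (j - 1) (by omega) (by omega)
            nlinarith
        rw [hk]
        obtain ⟨m, hm⟩ := Int.even_mul_succ_self (q - 1)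
        have e1 : PySem.Int.floordiv (q * (q - 1)) 2 = m := by
          rw [show q * (q - 1) = 2 * m from by linear_combination hm, fd_two_mul]
        have e2 : PySem.Int.floordiv ((q + 1) * (q + 1 - 1)) 2 = m + q := by
          rw [show (q + 1) * (q + 1 - 1) = 2 * (m + q) from by linear_combination hm, fd_two_mul]
        rw [e1, e2, show y - (q + 1) * -v - (m + q) = y + v - q * -(v - 1) - m from by ring]

-- fuel never runs out: the measure strictly decreases at every continuing step
theorem go_eq_rest (n : Nat) : ∀ (v y h : Int),
    (v + 1).toNat * ((v + 1).toNat + 1) + 2 * (y + 133).toNat < n →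
    step_y_go n v y (-72) (-132) h = rest_alt v y h := by
  induction n with
  | zero => intro v y h hm; exact absurd hm (by omega)
  | succ n ih =>
    intro v y h hm
    rw [step_y_go]
    by_cases hband : (-132:Int) - 1 < y + v ∧ y + v ≤ -72
    · rw [if_pos hband, rest_alt_low v y h (by omega), if_pos (by omega : (-132:Int) ≤ y + v)]
      split_ifs <;> omega
    · rw [if_neg hband]
      by_cases hlow : y + v < -132
      · rw [if_pos hlow, rest_alt_low v y h (by omega), if_neg (by omega : ¬ ((-132:Int) ≤ y + v))]
      · rw [if_neg hlow]
        have hup : -72 < y + v := by omega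
        have hdec : (v - 1 + 1).toNat * ((v - 1 + 1).toNat + 1) + 2 * (y + v + 133).toNat < n := by
          by_cases hv : 0 ≤ v
          · have e1 : (v + 1).toNat = v.toNat + 1 := by omega
            have e2 : (v - 1 + 1).toNat = v.toNat := by omega
            rw [e2] at *
            rw [e1] at hm
            have e3 : (v.toNat + 1) * (v.toNat + 1 + 1) = v.toNat * (v.toNat + 1) + 2 * (v.toNat + 1) := by ring
            omega
          · have e1 : (v + 1).toNat = 0 := by omega
            have e2 : (v - 1 + 1).toNat = 0 := by omega
            rw [e1] at hm
            rw [e2]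
            omega
        rw [ih (v - 1) (y + v) (if v - 1 = 0 then y + v else h) hdec,
            show (if v - 1 = 0 then y + v else h) = (if v = 1 then y + v else h) from by
              split_ifs <;> omega,
            ← rest_inv v y h hup]

theorem step_eq (v_y y y_min y_max height : Int) :
    step_y v_y y y_min y_max height = step_y_alt v_y y y_min y_max height := by
  rw [step_y,
      show (v_y + 1).toNat * ((v_y + 1).toNat + 1) + 2 * (y + 133).toNat + 2 =
        Nat.succ ((v_y + 1).toNat * ((v_y + 1).toNat + 1) + 2 * (y + 133).toNat + 1) from rfl,
      step_y_go]
  simp only [step_y_alt]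
  by_cases hband : y_max - 1 < y + v_y ∧ y + v_y ≤ y_min
  · rw [if_pos hband, if_pos (show y_max ≤ y + v_y ∧ y + v_y ≤ y_min from by omega)]
    split_ifs <;> omega
  · rw [if_neg hband,
        if_neg (show ¬ (y_max ≤ y + v_y ∧ y + v_y ≤ y_min) from by omega)]
    by_cases hlow : y + v_y < y_max
    · rw [if_pos hlow, if_pos hlow]
    · rw [if_neg hlow, if_neg hlow]
      rw [go_eq_rest _ (v_y - 1) (y + v_y) (if v_y - 1 = 0 then y + v_y else height) ?_]
      · congr 1
        split_ifs <;> omega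
      · by_cases hv : 0 ≤ v_y
        · have e1 : (v_y + 1).toNat = v_y.toNat + 1 := by omega
          have e2 : (v_y - 1 + 1).toNat = v_y.toNat := by omega
          rw [e1, e2]
          have e3 : (v_y.toNat + 1) * (v_y.toNat + 1 + 1) = v_y.toNat * (v_y.toNat + 1) + 2 * (v_y.toNat + 1) := by ring
          omega
        · have e1 : (v_y + 1).toNat = 0 := by omega
          have e2 : (v_y - 1 + 1).toNat = 0 := by omega
          rw [e1, e2]
          omega

-- ===== VERDICT (by name: the statement is the Claim_ definition above) =====
theorem step_y_spec : Claim_equal_step_y := by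
  intro v_y y y_min y_max height _ _
  unfold Spec_step_y
  exact step_eq v_y y y_min y_max height
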